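-- pv_equiv track=rewrite | github.com/EdwinChingate/DocumentingCode | Functions/_infer_function_name.py | _infer_function_name
-- ===== SOURCE A (Python) =====
-- from typing import List, Dict, Tuple, Optional
--
-- def _infer_function_name(doc_stem: str, py_stems: set, prefix: Optional[str]) -> Optional[str]:
--     """
--     Map a doc stem (e.g. 'ms2Topo_FolderToCanvas') to a .py stem (e.g. 'FolderToCanvas').
--
--     Strategy:
--       1) exact match
--       2) strip prefix if provided
--       3) suffix match against existing py stems (handles unknown prefix)
--     """
--     # 1) exact match
--     if doc_stem in py_stems:
--         return doc_stem
--
--     # 2) strip prefix if provided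
--     if prefix and doc_stem.startswith(prefix):
--         candidate = doc_stem[len(prefix):]
--         if candidate in py_stems:
--             return candidate
--
--     # 3) suffix match: pick the longest py stem that is a suffix of doc_stem
--     matches = [s for s in py_stems if doc_stem.endswith(s)]
--     if matches:
--         return max(matches, key=len)
--
--     return None
-- ===== SOURCE B (Python) =====
-- from typing import Optional
--
--
-- def _strip_by_prefix(doc_stem: str, py_stems: set, prefix: Optional[str]) -> Optional[str]:
--     """Step-2 special case as a standalone stage: only relevant when the full
--     stem is NOT itself a py stem (otherwise the suffix stage already wins)."""
--     if not prefix or doc_stem in py_stems or not doc_stem.startswith(prefix):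
--         return None
--     candidate = doc_stem[len(prefix):]
--     return candidate if candidate in py_stems else None
--
--
-- def _infer_function_name(doc_stem: str, py_stems: set, prefix: Optional[str]) -> Optional[str]:
--     # A's exact-match step is subsumed by the suffix stage (doc_stem is its own
--     # longest suffix), so B has only two stages: the prefix-strip special case,
--     # then a longest-first scan over the suffixes of doc_stem (i = 0 included),
--     # slicing only at lengths some py stem actually has.
--     stripped = _strip_by_prefix(doc_stem, py_stems, prefix)
--     if stripped is not None:
--         return stripped
--     n = len(doc_stem)
--     stem_lengths = {len(s) for s in py_stems}
--     for i in range(n + 1):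
--         if n - i in stem_lengths:
--             s = doc_stem[i:]
--             if s in py_stems:
--                 return s
--     return None
-- ===== Notes on version B (the rewrite author's own statement) =====
-- stated objective: alternative
-- what changed: B removes A's separate exact-match step (the full stem is its own longest suffix, so the suffix stage subsumes it), isolates the prefix-strip case in a helper returning an Optional, and replaces A's filter-all-stems + max-by-length with a longest-first scan over doc_stem's suffixes that slices only at lengths present in a precomputed set of stem lengths and returns the first suffix found in the set.
import Mathlib
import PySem

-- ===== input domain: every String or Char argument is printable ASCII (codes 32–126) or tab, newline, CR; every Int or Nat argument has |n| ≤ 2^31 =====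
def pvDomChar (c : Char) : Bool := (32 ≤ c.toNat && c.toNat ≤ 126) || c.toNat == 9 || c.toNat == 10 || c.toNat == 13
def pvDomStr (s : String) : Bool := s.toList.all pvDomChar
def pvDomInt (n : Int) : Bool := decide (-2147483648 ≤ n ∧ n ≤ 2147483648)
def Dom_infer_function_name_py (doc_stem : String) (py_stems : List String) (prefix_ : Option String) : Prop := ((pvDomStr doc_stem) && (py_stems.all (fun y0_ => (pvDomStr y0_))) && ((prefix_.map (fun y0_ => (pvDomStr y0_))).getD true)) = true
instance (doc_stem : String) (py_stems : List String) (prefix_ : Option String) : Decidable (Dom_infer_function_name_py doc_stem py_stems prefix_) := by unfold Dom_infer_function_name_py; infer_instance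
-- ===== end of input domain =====

-- B drops A's separate exact-match step (subsumed by the suffix stage) and restructures the function as two stages: a standalone prefix-strip helper returning an Option, then a longest-first scan over all suffixes of doc_stem (objective: alternative algorithm, same result).


-- ===== PORT A =====
-- step 3 of A: matches = [s for s in py_stems if doc_stem.endswith(s)]; if matches: return max(matches, key=len); return None
def infer_function_name_py_step3 (doc_stem : String) (py_stems : List String) : Option String :=
  let matches_ := py_stems.filter (fun s => PySem.Str.endswith doc_stem s)
  if matches_ = [] then none
  else PySem.List.max? matches_ (fun s => PySem.Str.len s)

def infer_function_name_py (doc_stem : String) (py_stems : List String) (prefix_ : Option String) : Option String :=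
  if doc_stem ∈ py_stems then some doc_stem          -- 1) exact match
  else
    match prefix_ with                               -- 2) strip prefix if provided
    | some p =>
      if (!(p == "")) && PySem.Str.startswith doc_stem p then
        let candidate := PySem.Str.slice doc_stem (some (PySem.Str.len p)) none
        if candidate ∈ py_stems then some candidate
        else infer_function_name_py_step3 doc_stem py_stems
      else infer_function_name_py_step3 doc_stem py_stems
    | none => infer_function_name_py_step3 doc_stem py_stems

-- ===== PORT B =====
-- Source B's helper _strip_by_prefix: the prefix-strip special case as its own stage
def strip_by_prefix (doc_stem : String) (py_stems : List String) (prefix_ : Option String) : Option String :=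
  match prefix_ with
  | none => none
  | some p =>
    if (p == "") || decide (doc_stem ∈ py_stems) || !PySem.Str.startswith doc_stem p then none
    else
      let candidate := PySem.Str.slice doc_stem (some (PySem.Str.len p)) none
      if candidate ∈ py_stems then some candidate else none

-- Source B's stem_lengths = {len(s) for s in py_stems}
def stemLengths (py_stems : List String) : List Int :=
  PySem.Set.ofList (py_stems.map (fun s => PySem.Str.len s))

-- Source B's loop: for i in range(n+1): if n-i in stem_lengths and doc_stem[i:] in py_stems: return doc_stem[i:]
def bestSuffix (py_stems : List String) (lengths : List Int) (cs : List Char) : Option String :=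
  if ((cs.length : Int) ∈ lengths ∧ String.ofList cs ∈ py_stems) then some (String.ofList cs)
  else
    match cs with
    | [] => none
    | _ :: t => bestSuffix py_stems lengths t

def infer_function_name_py_alt (doc_stem : String) (py_stems : List String) (prefix_ : Option String) : Option String :=
  match strip_by_prefix doc_stem py_stems prefix_ with
  | some c => some c
  | none => bestSuffix py_stems (stemLengths py_stems) doc_stem.toList

-- ===== PRECONDITION & SPEC =====
def Spec_infer_function_name_py (doc_stem : String) (py_stems : List String) (prefix_ : Option String) (out : Option String) : Prop := out = infer_function_name_py_alt doc_stem py_stems prefix_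
instance (doc_stem : String) (py_stems : List String) (prefix_ : Option String) (out : Option String) : Decidable (Spec_infer_function_name_py doc_stem py_stems prefix_ out) := by unfold Spec_infer_function_name_py; infer_instance

-- ===== CLAIM (what is proved, stated in full; the proofs are below) =====
def Claim_equal_infer_function_name_py : Prop := ∀ (doc_stem : String) (py_stems : List String) (prefix_ : Option String), Dom_infer_function_name_py doc_stem py_stems prefix_ → Spec_infer_function_name_py doc_stem py_stems prefix_ (infer_function_name_py doc_stem py_stems prefix_)

-- ===== LEMMAS AND PROOFS =====

-- Python's max(l, key=len) is determined when one member has maximal length and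
-- every member of that length equals it.
theorem maxLen_eq_of_unique (l : List String) (x : String) (hx : x ∈ l)
    (hmax : ∀ y ∈ l, y.length ≤ x.length)
    (huniq : ∀ y ∈ l, y.length = x.length → y = x) :
    PySem.List.max? l (fun s => (s.length : Int)) = some x := by
  cases hm : PySem.List.max? l (fun s => (s.length : Int)) with
  | none =>
    rw [PySem.List.max?_eq_none_iff] at hm
    subst hm; cases hx
  | some m =>
    have hmem := PySem.List.max?_mem hm
    have h1 := PySem.List.max?_isMax hm x hx
    have h2 := hmax m hmem
    simp only [Nat.cast_le] at h1
    exact congrArg some (huniq m hmem (by omega))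

theorem str_eq_of_toList (s t : String) (h : s.toList = t.toList) : s = t := by
  have := congrArg String.ofList h
  simpa using this

-- proof-side helper: the suffix scan without the length-set guard
def plainScan (py_stems : List String) (cs : List Char) : Option String :=
  if String.ofList cs ∈ py_stems then some (String.ofList cs)
  else
    match cs with
    | [] => none
    | _ :: t => plainScan py_stems t

theorem mem_stemLengths (py_stems : List String) (s : String) (h : s ∈ py_stems) :
    (s.length : Int) ∈ stemLengths py_stems := by
  simp only [stemLengths, PySem.Set.mem_ofList, List.mem_map, PySem.Str.len]
  exact ⟨s, h, rfl⟩

-- the length-set guard never skips a member of the set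
theorem bestSuffix_eq_plain (py_stems : List String) :
    ∀ cs : List Char, bestSuffix py_stems (stemLengths py_stems) cs = plainScan py_stems cs := by
  intro cs
  induction cs with
  | nil =>
    rw [bestSuffix.eq_def, plainScan.eq_def]
    by_cases hm : String.ofList ([] : List Char) ∈ py_stems
    · have hl := mem_stemLengths py_stems _ hm
      simp only [String.length_ofList] at hl
      simp only [List.length_nil, Nat.cast_zero] at hl
      simp [hm, hl]
    · simp [hm]
  | cons c t ih =>
    rw [bestSuffix.eq_def, plainScan.eq_def]
    by_cases hm : String.ofList (c :: t) ∈ py_stems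
    · have hl := mem_stemLengths py_stems _ hm
      simp only [String.length_ofList] at hl
      simp only [List.length_cons, Nat.cast_add, Nat.cast_one] at hl
      simp [hm, hl]
    · simp [hm, ih]

-- when the full string is not a stem, the longest-first scan over proper suffixes
-- computes exactly A's "filter suffixes then max by length"
theorem plain_eq_step3 (py_stems : List String) :
    ∀ cs : List Char, String.ofList cs ∉ py_stems →
      plainScan py_stems cs = infer_function_name_py_step3 (String.ofList cs) py_stems := by
  intro cs
  induction cs with
  | nil =>
    intro h
    have hf : py_stems.filter (fun s => PySem.Chars.endswith ([] : List Char) s.toList) = [] := by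
      rw [List.filter_eq_nil_iff]
      intro s hs hp
      rw [PySem.Chars.endswith_iff] at hp
      have hnil : s.toList = [] := List.suffix_nil.mp hp
      exact h (by simpa [← str_eq_of_toList s (String.ofList []) (by simp [hnil])] using hs)
    simp [plainScan, h, infer_function_name_py_step3, hf]
  | cons c t ih =>
    intro h
    rw [plainScan.eq_def]
    simp only [if_neg h]
    by_cases hm : String.ofList t ∈ py_stems
    · -- the scan returns the longest proper suffix that is a stem
      have hend : PySem.Chars.endswith (c :: t) (String.ofList t).toList = true := by
        simp only [String.toList_ofList]
        rw [PySem.Chars.endswith_iff]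
        exact List.suffix_cons c t
      have hxmem : String.ofList t ∈
          py_stems.filter (fun s => PySem.Chars.endswith (c :: t) s.toList) :=
        List.mem_filter.mpr ⟨hm, hend⟩
      have hsub : ∀ y ∈ py_stems.filter (fun s => PySem.Chars.endswith (c :: t) s.toList),
          y.toList <:+ t := by
        intro y hy
        obtain ⟨hy1, hy2⟩ := List.mem_filter.mp hy
        rw [PySem.Chars.endswith_iff, List.suffix_cons_iff] at hy2
        rcases hy2 with he | hs
        · exact absurd (by simpa [← str_eq_of_toList y (String.ofList (c :: t)) (by simp [he])] using hy1) h
        · exact hs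
      have hmax := maxLen_eq_of_unique _ (String.ofList t) hxmem
        (by intro y hy
            have := (hsub y hy).length_le
            simpa [← String.length_toList] using this)
        (by intro y hy hlen
            have hsuf := hsub y hy
            have hyt : y.toList = t := List.IsSuffix.eq_of_length hsuf (by simpa [String.length_toList] using hlen)
            exact str_eq_of_toList _ _ (by simpa using hyt))
      rw [plainScan.eq_def]
      simp only [if_pos hm]
      simp [infer_function_name_py_step3, hmax]
      exact ⟨String.ofList t, hm, hend⟩
    · -- neither the full string nor this suffix is a stem: the filters coincide
      have hfc : py_stems.filter (fun s => PySem.Str.endswith (String.ofList (c :: t)) s)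
          = py_stems.filter (fun s => PySem.Str.endswith (String.ofList t) s) := by
        apply List.filter_congr
        intro s hs
        rw [PySem.Str.endswith_eq, PySem.Str.endswith_eq]
        simp only [String.toList_ofList]
        rw [Bool.eq_iff_iff, PySem.Chars.endswith_iff, PySem.Chars.endswith_iff]
        rw [List.suffix_cons_iff]
        constructor
        · rintro (he | hsuf)
          · exact absurd (by simpa [← str_eq_of_toList s (String.ofList (c :: t)) (by simp [he])] using hs) h
          · exact hsuf
        · exact Or.inr
      have hstep : infer_function_name_py_step3 (String.ofList (c :: t)) py_stems
          = infer_function_name_py_step3 (String.ofList t) py_stems := by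
        unfold infer_function_name_py_step3
        rw [hfc]
      rw [hstep]
      exact ih hm

theorem best_full_mem (py_stems : List String) (doc_stem : String)
    (h : doc_stem ∈ py_stems) :
    bestSuffix py_stems (stemLengths py_stems) doc_stem.toList = some doc_stem := by
  rw [bestSuffix_eq_plain, plainScan.eq_def]
  simp [h]

theorem best_full_not_mem (py_stems : List String) (doc_stem : String)
    (h : doc_stem ∉ py_stems) :
    bestSuffix py_stems (stemLengths py_stems) doc_stem.toList = infer_function_name_py_step3 doc_stem py_stems := by
  rw [bestSuffix_eq_plain]
  have := plain_eq_step3 py_stems doc_stem.toList (by simpa using h)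
  simpa using this

-- ===== VERDICT (by name: the statement is the Claim_ definition above) =====
theorem infer_function_name_py_spec : Claim_equal_infer_function_name_py := by
  intro doc_stem py_stems prefix_ _dom
  unfold Spec_infer_function_name_py
  by_cases h1 : doc_stem ∈ py_stems
  · -- B's strip stage yields none (its guard sees doc_stem ∈ py_stems) and the
    -- suffix stage returns the full string, matching A's exact-match step
    cases prefix_ with
    | none =>
      simp [infer_function_name_py, infer_function_name_py_alt, strip_by_prefix, h1,
        best_full_mem]
    | some p =>
      simp [infer_function_name_py, infer_function_name_py_alt, strip_by_prefix, h1,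
        best_full_mem]
  · have hbest := best_full_not_mem py_stems doc_stem h1
    cases prefix_ with
    | none =>
      simp [infer_function_name_py, infer_function_name_py_alt, strip_by_prefix, h1, hbest]
    | some p =>
      simp only [infer_function_name_py, infer_function_name_py_alt, strip_by_prefix,
        if_neg h1]
      by_cases hpe : p = ""
      · simp [hpe, hbest]
      · by_cases hsw : PySem.Str.startswith doc_stem p = true
        · by_cases h3 : PySem.Str.slice doc_stem (some (PySem.Str.len p)) none ∈ py_stems
          · simp only [PySem.Str.startswith] at hsw
            simp only [PySem.Str.len, String.length_toList] at h3
            simp [hpe, hsw, h3, h1]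
          · simp only [PySem.Str.startswith] at hsw
            simp only [PySem.Str.len, String.length_toList] at h3
            simp [hpe, hsw, h3, h1, hbest]
        · simp [hpe, hbest, Bool.not_eq_true] at *
          simp [hsw]
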